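-- pv_equiv track=rewrite | github.com/colinschepers/AdventOfCode | challenges/2024/day22.py | get_best_price
-- ===== SOURCE A (Python) =====
-- from collections import defaultdict
-- from collections.abc import Sequence
-- from itertools import pairwise, accumulate
-- from typing import Tuple
--
-- def get_best_price(buyer_secrets: Sequence[Sequence[int]]) -> int:
--     sell_options: dict[Tuple[int, ...], int] = defaultdict(int)
--
--     for secrets in buyer_secrets:
--         changes_seen: set[Tuple[int, ...]] = set()
--         last_4_changes: Tuple[int, ...] = tuple()
--         for prev_secret, secret in pairwise(secrets):
--             last_4_changes = (*last_4_changes[-3:], secret % 10 - prev_secret % 10)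
--             if len(last_4_changes) == 4 and last_4_changes not in changes_seen:
--                 sell_options[last_4_changes] += secret % 10
--             changes_seen.add(last_4_changes)
--
--     return max(sell_options.values())
-- ===== SOURCE B (Python) =====
-- def get_best_price(buyer_secrets):
--     totals = {}
--     for secrets in buyer_secrets:
--         prices = [s % 10 for s in secrets]
--         first_price = {}
--         for i in reversed(range(4, len(prices))):
--             window = (prices[i - 3] - prices[i - 4],
--                       prices[i - 2] - prices[i - 3],
--                       prices[i - 1] - prices[i - 2],
--                       prices[i] - prices[i - 1])
--             first_price[window] = prices[i]
--         for window, price in first_price.items():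
--             totals[window] = totals.get(window, 0) + price
--     return max(totals.values())
-- ===== Notes on version B (the rewrite author's own statement) =====
-- stated objective: alternative
-- what changed: B replaces A's single streaming pass (incrementally grown last_4_changes tuple plus a per-buyer seen-set guarding a shared defaultdict) by two stages per buyer: it builds the window-to-first-price map back-to-front (reversed index loop with plain overwrite-on-insert, so the first occurrence wins and no seen-set exists at all) and then merges each per-buyer map into the totals dict.
import Mathlib
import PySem

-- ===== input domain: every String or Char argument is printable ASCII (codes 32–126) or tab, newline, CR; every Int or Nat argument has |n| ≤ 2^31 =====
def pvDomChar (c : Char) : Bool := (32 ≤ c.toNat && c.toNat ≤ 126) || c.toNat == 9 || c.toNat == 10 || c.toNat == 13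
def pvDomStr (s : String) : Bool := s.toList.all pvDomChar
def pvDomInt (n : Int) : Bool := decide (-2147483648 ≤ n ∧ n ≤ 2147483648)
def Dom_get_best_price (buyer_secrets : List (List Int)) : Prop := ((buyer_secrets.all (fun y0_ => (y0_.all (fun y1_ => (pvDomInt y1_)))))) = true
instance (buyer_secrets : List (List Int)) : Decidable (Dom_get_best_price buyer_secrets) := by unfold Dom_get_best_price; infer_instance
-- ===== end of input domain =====

-- B replaces A's single streaming pass (incrementally grown last_4_changes tuple plus a
-- per-buyer seen-set guarding a shared defaultdict) by two stages per buyer: it builds the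
-- window -> first-price map BACK-TO-FRONT (reversed index loop, overwrite-on-insert, so the
-- first occurrence wins with no seen-set), then merges each per-buyer map into the totals
-- dict (objective: alternative decomposition, same linear cost). Equivalence is on the
-- return value on Pre_.

-- ===== PORT A =====
-- A's inner-loop body: grow last_4_changes, add secret % 10 on first sighting of a full window
def pvStepA (st : PySem.Set (List Int) × List Int × PySem.Dict (List Int) Int)
    (pq : Int × Int) : PySem.Set (List Int) × List Int × PySem.Dict (List Int) Int :=
  let last4 := PySem.List.slice st.2.1 (some (-3)) none ++
      [PySem.Int.mod pq.2 10 - PySem.Int.mod pq.1 10]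
  let d := if last4.length = 4 ∧ PySem.Set.contains st.1 last4 = false
    then st.2.2.insert last4 (st.2.2.getD last4 0 + PySem.Int.mod pq.2 10)
    else st.2.2
  (PySem.Set.add st.1 last4, last4, d)

-- one buyer: 'for prev_secret, secret in pairwise(secrets)' (pairwise = zip(s, s[1:]))
def pvBuyerA (d : PySem.Dict (List Int) Int) (secrets : List Int) : PySem.Dict (List Int) Int :=
  ((secrets.zip secrets.tail).foldl pvStepA (PySem.Set.empty, ([] : List Int), d)).2.2

def get_best_price (buyer_secrets : List (List Int)) : Int :=
  let sell_options := buyer_secrets.foldl pvBuyerA PySem.Dict.empty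
  -- max(sell_options.values()): none = ValueError on an empty dict, excluded by Pre_
  (PySem.List.max? sell_options.values (fun v => v)).getD 0

-- ===== PORT B =====
-- one buyer: build window -> first price back-to-front (reversed range, overwrite wins),
-- then merge the per-buyer map into the running totals dict
def pvBuyerB (d : PySem.Dict (Int × Int × Int × Int) Int) (secrets : List Int) :
    PySem.Dict (Int × Int × Int × Int) Int :=
  let prices := secrets.map (fun s => PySem.Int.mod s 10)
  let first_price := ((PySem.List.pyRange 4 (PySem.List.len prices) 1).reverse).foldl
    (fun fp i =>
      let window := (PySem.List.pyGetD prices (i - 3) 0 - PySem.List.pyGetD prices (i - 4) 0,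
        PySem.List.pyGetD prices (i - 2) 0 - PySem.List.pyGetD prices (i - 3) 0,
        PySem.List.pyGetD prices (i - 1) 0 - PySem.List.pyGetD prices (i - 2) 0,
        PySem.List.pyGetD prices i 0 - PySem.List.pyGetD prices (i - 1) 0)
      fp.insert window (PySem.List.pyGetD prices i 0))
    PySem.Dict.empty
  first_price.items.foldl (fun t wp => t.insert wp.1 (t.getD wp.1 0 + wp.2)) d

def get_best_price_alt (buyer_secrets : List (List Int)) : Int :=
  let totals := buyer_secrets.foldl pvBuyerB PySem.Dict.empty
  -- max(totals.values()): none = ValueError on an empty dict, excluded by Pre_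
  (PySem.List.max? totals.values (fun v => v)).getD 0

-- ===== PRECONDITION & SPEC =====
-- Pre_ excludes exactly the inputs where no buyer has ≥ 5 secrets: there the dict stays
-- empty and both Pythons raise ValueError in max() (the ports return the junk value 0).
def Pre_get_best_price (buyer_secrets : List (List Int)) : Prop :=
  ∃ s ∈ buyer_secrets, 5 ≤ s.length
instance (buyer_secrets : List (List Int)) : Decidable (Pre_get_best_price buyer_secrets) := by
  unfold Pre_get_best_price; infer_instance

def pvWitness_get_best_price : List (List Int) := [[1, 2, 3, 4, 5]]

def Spec_get_best_price (buyer_secrets : List (List Int)) (out : Int) : Prop :=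
  out = get_best_price_alt buyer_secrets
instance (buyer_secrets : List (List Int)) (out : Int) : Decidable (Spec_get_best_price buyer_secrets out) := by
  unfold Spec_get_best_price; infer_instance

-- ===== CLAIM (what is proved, stated in full; the proofs are below) =====
def Claim_equal_get_best_price : Prop := ∀ (buyer_secrets : List (List Int)),
  Dom_get_best_price buyer_secrets → Pre_get_best_price buyer_secrets →
  Spec_get_best_price buyer_secrets (get_best_price buyer_secrets)

-- ===== LEMMAS AND PROOFS =====

-- a window as A stores it: the 4-tuple flattened to a list key
def pvToL (q : Int × Int × Int × Int) : List Int := [q.1, q.2.1, q.2.2.1, q.2.2.2]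

-- an event (window, price) with the window key flattened to A's list key
def pvToLize (p : (Int × Int × Int × Int) × Int) : List Int × Int := (pvToL p.1, p.2)

-- A's pair (prev, sec) reduced to the (change, price) it contributes
def pvCP (pq : Int × Int) : Int × Int :=
  (PySem.Int.mod pq.2 10 - PySem.Int.mod pq.1 10, PySem.Int.mod pq.2 10)

-- A's step at the (change, price) level
def pvStepA' (st : PySem.Set (List Int) × List Int × PySem.Dict (List Int) Int)
    (cp : Int × Int) : PySem.Set (List Int) × List Int × PySem.Dict (List Int) Int :=
  let last4 := PySem.List.slice st.2.1 (some (-3)) none ++ [cp.1]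
  let d := if last4.length = 4 ∧ PySem.Set.contains st.1 last4 = false
    then st.2.2.insert last4 (st.2.2.getD last4 0 + cp.2)
    else st.2.2
  (PySem.Set.add st.1 last4, last4, d)

-- 'totals[w] = totals.get(w, 0) + p', for either key type
def pvAdd {κ : Type} [BEq κ] (d : PySem.Dict κ Int) (p : κ × Int) : PySem.Dict κ Int :=
  d.insert p.1 (d.getD p.1 0 + p.2)

-- A's dict update with the window flattened to its list key
def pvAddL (d : PySem.Dict (List Int) Int) (wp : (Int × Int × Int × Int) × Int) :
    PySem.Dict (List Int) Int :=
  d.insert (pvToL wp.1) (d.getD (pvToL wp.1) 0 + wp.2)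

-- B's (window, price) event stream, generated from the rolling last three changes
def pvWin : Int → Int → Int → List (Int × Int) → List ((Int × Int × Int × Int) × Int)
  | _, _, _, [] => []
  | a, b, c, (x, p) :: t => ((a, b, c, x), p) :: pvWin b c x t

-- the same event stream generated from the price list itself
def pvEvents : List Int → List ((Int × Int × Int × Int) × Int)
  | p0 :: p1 :: p2 :: p3 :: p4 :: rest =>
      ((p1 - p0, p2 - p1, p3 - p2, p4 - p3), p4) :: pvEvents (p1 :: p2 :: p3 :: p4 :: rest)
  | _ => []

-- keep only the first event per window, skipping windows already seen
def pvDedup (s : PySem.Set (Int × Int × Int × Int)) :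
    List ((Int × Int × Int × Int) × Int) → List ((Int × Int × Int × Int) × Int)
  | [] => []
  | wp :: t =>
      if PySem.Set.contains s wp.1 then pvDedup (PySem.Set.add s wp.1) t
      else wp :: pvDedup (PySem.Set.add s wp.1) t

lemma pvToL_inj {q q' : Int × Int × Int × Int} : pvToL q = pvToL q' ↔ q = q' := by
  obtain ⟨a, b, c, d⟩ := q; obtain ⟨a', b', c', d'⟩ := q'
  simp [pvToL, Prod.ext_iff]

lemma pvBeq (q q' : Int × Int × Int × Int) : (pvToL q == pvToL q') = (q == q') := by
  rw [Bool.eq_iff_iff]; simp [pvToL_inj]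

lemma pvContains_add {α : Type} [BEq α] [LawfulBEq α] (s : PySem.Set α) (x y : α) :
    PySem.Set.contains (PySem.Set.add s x) y = (PySem.Set.contains s y || y == x) := by
  rw [Bool.eq_iff_iff]
  simp [PySem.Set.mem_add]

lemma pvContains_false {α : Type} [BEq α] [LawfulBEq α] (s : PySem.Set α) (x : α)
    (h : x ∉ s) : PySem.Set.contains s x = false := by
  rw [Bool.eq_false_iff]
  simp [h]

lemma pvSlice3 (l : List Int) (h : l.length ≤ 3) :
    PySem.List.slice l (some (-3)) none = l := by
  rw [PySem.List.slice_from_neg_ofNat l 3 (by omega), Nat.sub_eq_zero_of_le h, List.drop_zero]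

lemma pvSlice4 (a b c x : Int) :
    PySem.List.slice [a, b, c, x] (some (-3)) none = [b, c, x] := by
  rw [PySem.List.slice_from_neg_ofNat _ 3 (by omega)]
  rfl

-- A's steady loop = fold of 'add' over the deduped event stream
lemma pvSteady : ∀ (t : List (Int × Int)) (a b c : Int) (l4 : List Int),
    PySem.List.slice l4 (some (-3)) none = [a, b, c] →
    ∀ (sA : PySem.Set (List Int)) (sB : PySem.Set (Int × Int × Int × Int)),
    (∀ q, PySem.Set.contains sA (pvToL q) = PySem.Set.contains sB q) →
    ∀ (dA : PySem.Dict (List Int) Int),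
    (t.foldl pvStepA' (sA, l4, dA)).2.2 =
      (pvDedup sB (pvWin a b c t)).foldl pvAddL dA := by
  intro t
  induction t with
  | nil => intros; rfl
  | cons xp t ih =>
    obtain ⟨x, p⟩ := xp
    intro a b c l4 h3 sA sB hs dA
    have hw : pvToL (a, b, c, x) = [a, b, c, x] := rfl
    have hcA : PySem.Set.contains sA [a, b, c, x] = PySem.Set.contains sB (a, b, c, x) := by
      rw [← hw]; exact hs _
    simp only [pvWin, List.foldl_cons, pvDedup]
    by_cases hc : PySem.Set.contains sB (a, b, c, x) = true
    · have hA : pvStepA' (sA, l4, dA) (x, p) =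
          (PySem.Set.add sA [a, b, c, x], [a, b, c, x], dA) := by
        simp only [pvStepA', h3, List.cons_append, List.nil_append]
        rw [if_neg (by rintro ⟨-, h2⟩; rw [hcA, hc] at h2; cases h2)]
      rw [if_pos hc, hA]
      refine ih b c x [a, b, c, x] (pvSlice4 a b c x) _ _ ?_ _
      intro q
      rw [← hw, pvContains_add, hs, pvBeq]
      by_cases hq : q = (a, b, c, x)
      · subst hq; rw [hc]; simp
      · simp [hq]
    · have hc' : PySem.Set.contains sB (a, b, c, x) = false := by
        revert hc; cases PySem.Set.contains sB (a, b, c, x) <;> simp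
      have hA : pvStepA' (sA, l4, dA) (x, p) =
          (PySem.Set.add sA [a, b, c, x], [a, b, c, x], pvAddL dA ((a, b, c, x), p)) := by
        simp only [pvStepA', h3, List.cons_append, List.nil_append]
        rw [if_pos ⟨rfl, by rw [hcA]; exact hc'⟩]
        rfl
      rw [if_neg (by rw [hc']; simp), hA, List.foldl_cons]
      refine ih b c x [a, b, c, x] (pvSlice4 a b c x) _ _ ?_ _
      intro q
      rw [← hw, pvContains_add, pvContains_add, hs, pvBeq]

-- fewer than four changes: A's dict is untouched
lemma pvShortA : ∀ (t : List (Int × Int)) (sA : PySem.Set (List Int)) (l4 : List Int)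
    (dA : PySem.Dict (List Int) Int), l4.length + t.length ≤ 3 →
    (t.foldl pvStepA' (sA, l4, dA)).2.2 = dA := by
  intro t
  induction t with
  | nil => intros; rfl
  | cons xp t ih =>
    intro sA l4 dA h
    obtain ⟨x, p⟩ := xp
    simp only [List.foldl_cons, pvStepA']
    rw [pvSlice3 l4 (by simp at h; omega)]
    rw [if_neg (by rintro ⟨h1, -⟩; simp at h h1; omega)]
    exact ih _ _ _ (by simp at h ⊢; omega)

-- the first three changes only ramp the tuple up, touching neither dict
lemma pvRamp (cp1 cp2 cp3 : Int × Int) (d : PySem.Dict (List Int) Int) :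
    pvStepA' (pvStepA' (pvStepA' (PySem.Set.empty, ([] : List Int), d) cp1) cp2) cp3 =
      ([[cp1.1], [cp1.1, cp2.1], [cp1.1, cp2.1, cp3.1]], [cp1.1, cp2.1, cp3.1], d) := by
  have e1 : pvStepA' (PySem.Set.empty, ([] : List Int), d) cp1 = ([[cp1.1]], [cp1.1], d) := by
    simp only [pvStepA']
    rw [pvSlice3 [] (by simp), List.nil_append]
    rw [if_neg (by rintro ⟨h1, -⟩; simp at h1)]
    simp [PySem.Set.add]
  have e2 : pvStepA' ([[cp1.1]], [cp1.1], d) cp2 =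
      ([[cp1.1], [cp1.1, cp2.1]], [cp1.1, cp2.1], d) := by
    simp only [pvStepA']
    rw [pvSlice3 [cp1.1] (by simp)]
    simp only [List.cons_append, List.nil_append]
    rw [if_neg (by rintro ⟨h1, -⟩; simp at h1)]
    simp [PySem.Set.add]
  have e3 : pvStepA' ([[cp1.1], [cp1.1, cp2.1]], [cp1.1, cp2.1], d) cp3 =
      ([[cp1.1], [cp1.1, cp2.1], [cp1.1, cp2.1, cp3.1]], [cp1.1, cp2.1, cp3.1], d) := by
    simp only [pvStepA']
    rw [pvSlice3 [cp1.1, cp2.1] (by simp)]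
    simp only [List.cons_append, List.nil_append]
    rw [if_neg (by rintro ⟨h1, -⟩; simp at h1)]
    simp [PySem.Set.add]
  rw [e1, e2, e3]

-- the rolling-window stream over the change pairs IS the event stream over the prices
lemma pvWinEvents : ∀ (t : List Int) (p0 p1 p2 p3 : Int),
    pvWin (p1 - p0) (p2 - p1) (p3 - p2)
      (((p3 :: t).zip t).map (fun ab => (ab.2 - ab.1, ab.2))) =
    pvEvents (p0 :: p1 :: p2 :: p3 :: t) := by
  intro t
  induction t with
  | nil => intros; rfl
  | cons x t ih =>
    intro p0 p1 p2 p3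
    simp only [List.zip_cons_cons, List.map_cons, pvWin, pvEvents]
    exact congrArg (List.cons _) (ih p1 p2 p3 x)

lemma pvEvents_short (ps : List Int)
    (h : ∀ (p0 p1 p2 p3 p4 : ℤ) (rest : List ℤ), ps = p0 :: p1 :: p2 :: p3 :: p4 :: rest → False) :
    pvEvents ps = [] ∧ ps.length ≤ 4 := by
  match ps with
  | [] => exact ⟨rfl, by simp⟩
  | [_] => exact ⟨rfl, by simp⟩
  | [_,_] => exact ⟨rfl, by simp⟩
  | [_,_,_] => exact ⟨rfl, by simp⟩
  | [_,_,_,_] => exact ⟨rfl, by simp⟩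
  | p0::p1::p2::p3::p4::rest => exact absurd rfl (by intro hh; exact h _ _ _ _ _ _ hh)

lemma pvEvents_length : ∀ (ps : List Int), (pvEvents ps).length = ps.length - 4 := by
  intro ps
  induction ps using pvEvents.induct with
  | case1 p0 p1 p2 p3 p4 rest ih => (simp [pvEvents, ih]; try omega)
  | case2 ps h =>
    obtain ⟨h1, h2⟩ := pvEvents_short ps h
    rw [h1]; simp; omega

lemma pvEvents_getElem? : ∀ (ps : List Int) (k : Nat), k + 4 < ps.length →
    (pvEvents ps)[k]? = some ((ps.getD (k + 1) 0 - ps.getD k 0,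
      ps.getD (k + 2) 0 - ps.getD (k + 1) 0,
      ps.getD (k + 3) 0 - ps.getD (k + 2) 0,
      ps.getD (k + 4) 0 - ps.getD (k + 3) 0), ps.getD (k + 4) 0) := by
  intro ps
  induction ps using pvEvents.induct with
  | case1 p0 p1 p2 p3 p4 rest ih =>
    intro k hk
    match k with
    | 0 => simp [pvEvents]
    | k + 1 =>
      simp only [pvEvents, List.getElem?_cons_succ]
      rw [ih k (by simp at hk ⊢; omega)]
      simp [List.getD]
  | case2 ps h =>
    intro k hk
    obtain ⟨-, h2⟩ := pvEvents_short ps h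
    omega

-- B's indexed window list over range(4, n) IS the event stream over the prices
lemma pvEmap (ps : List Int) :
    (PySem.List.pyRange 4 (PySem.List.len ps) 1).map (fun i =>
      ((PySem.List.pyGetD ps (i - 3) 0 - PySem.List.pyGetD ps (i - 4) 0,
        PySem.List.pyGetD ps (i - 2) 0 - PySem.List.pyGetD ps (i - 3) 0,
        PySem.List.pyGetD ps (i - 1) 0 - PySem.List.pyGetD ps (i - 2) 0,
        PySem.List.pyGetD ps i 0 - PySem.List.pyGetD ps (i - 1) 0),
       PySem.List.pyGetD ps i 0)) = pvEvents ps := by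
  rw [PySem.List.len_eq, PySem.List.pyRange_one, List.map_map]
  apply List.ext_getElem?
  intro k
  by_cases hk : k + 4 < ps.length
  · have hlt : k < ((ps.length : Int) - 4).toNat := by omega
    rw [List.getElem?_map, List.getElem?_range hlt, pvEvents_getElem? ps k hk]
    have e4 : (4 : Int) + (k : Int) = ((k + 4 : Nat) : Int) := by push_cast; ring
    have e1 : ((k + 4 : Nat) : Int) - 3 = ((k + 1 : Nat) : Int) := by push_cast; ring
    have e2 : ((k + 4 : Nat) : Int) - 2 = ((k + 2 : Nat) : Int) := by push_cast; ring
    have e3 : ((k + 4 : Nat) : Int) - 1 = ((k + 3 : Nat) : Int) := by push_cast; ring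
    have e0 : ((k + 4 : Nat) : Int) - 4 = ((k : Nat) : Int) := by push_cast; ring
    simp only [Option.map_some, Function.comp_apply, e4, e0, e1, e2, e3,
      PySem.List.pyGetD_natCast]
  · rw [List.getElem?_eq_none, List.getElem?_eq_none]
    · rw [pvEvents_length]; omega
    · rw [List.length_map, List.length_range]; omega

-- last-write-wins lookup of an insert-overwrite fold
lemma pvGetFoldIns {κ : Type} [BEq κ] [LawfulBEq κ] :
    ∀ (M : List (κ × Int)) (d : PySem.Dict κ Int) (k : κ),
    (M.foldl (fun fp q => fp.insert q.1 q.2) d).get? k =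
      match M.reverse.find? (fun p => p.1 == k) with
      | some p => some p.2
      | none => d.get? k := by
  intro M
  induction M with
  | nil => intro d k; rfl
  | cons a M ih =>
    intro d k
    rw [List.foldl_cons, ih, List.reverse_cons, List.find?_append]
    cases hM : M.reverse.find? (fun p => p.1 == k) with
    | some p => rfl
    | none =>
      by_cases hak : a.1 = k
      · subst hak
        rw [List.find?_cons_of_pos (by simp)]
        simp [PySem.Dict.get?_insert_self]
      · rw [List.find?_cons_of_neg (by simp [hak]), List.find?_nil]
        simp only [Option.none_or]
        rw [PySem.Dict.get?_insert_of_ne _ _ (by exact fun h => hak h.symm)]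

-- in a list with unique keys, membership is exactly what find? at the key returns
lemma pvFindMem {κ ν : Type} [BEq κ] [LawfulBEq κ] :
    ∀ (l : List (κ × ν)), (l.map Prod.fst).Nodup → ∀ (p : κ × ν),
    (p ∈ l ↔ l.find? (fun q => q.1 == p.1) = some p) := by
  intro l
  induction l with
  | nil => intro _ p; simp
  | cons a l ih =>
    intro hnd p
    have hnd' : (l.map Prod.fst).Nodup := (List.nodup_cons.mp hnd).2
    have ha : a.1 ∉ l.map Prod.fst := (List.nodup_cons.mp hnd).1
    by_cases hk : a.1 = p.1
    · rw [List.find?_cons_of_pos (by simp [hk])]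
      constructor
      · rintro hp
        rcases List.mem_cons.mp hp with h | h
        · rw [h]
        · exact absurd (hk ▸ (List.mem_map.mpr ⟨p, h, rfl⟩)) ha
      · rintro hp
        rw [Option.some_inj] at hp
        exact hp ▸ List.mem_cons_self
    · rw [List.find?_cons_of_neg (by simp [hk])]
      rw [← ih hnd' p]
      constructor
      · intro hp
        rcases List.mem_cons.mp hp with h | h
        · exact absurd (congrArg Prod.fst h).symm hk
        · exact h
      · exact fun hp => List.mem_cons_of_mem _ hp

lemma pvDedup_find? : ∀ (E : List ((Int × Int × Int × Int) × Int))
    (s : PySem.Set (Int × Int × Int × Int)) (k : Int × Int × Int × Int),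
    (pvDedup s E).find? (fun q => q.1 == k) =
      if PySem.Set.contains s k then none else E.find? (fun q => q.1 == k) := by
  intro E
  induction E with
  | nil => intro s k; simp [pvDedup]
  | cons wp t ih =>
    intro s k
    by_cases hk : wp.1 = k
    · subst hk
      by_cases hc : PySem.Set.contains s wp.1 = true
      · rw [pvDedup, if_pos hc, if_pos hc, ih]
        rw [if_pos (by rw [pvContains_add, hc]; simp)]
      · have hc' : PySem.Set.contains s wp.1 = false := by
          revert hc; cases PySem.Set.contains s wp.1 <;> simp
        rw [pvDedup, if_neg (by rw [hc']; simp), if_neg (by rw [hc']; simp)]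
        rw [List.find?_cons_of_pos (by simp), List.find?_cons_of_pos (by simp)]
    · have step : (pvDedup (PySem.Set.add s wp.1) t).find? (fun q => q.1 == k) =
          if PySem.Set.contains (PySem.Set.add s wp.1) k then none
          else t.find? (fun q => q.1 == k) := ih _ _
      have hca : PySem.Set.contains (PySem.Set.add s wp.1) k = PySem.Set.contains s k := by
        rw [pvContains_add]
        have : (k == wp.1) = false := by rw [beq_eq_false_iff_ne]; exact fun h => hk h.symm
        rw [this, Bool.or_false]
      by_cases hc : PySem.Set.contains s wp.1 = true
      · rw [pvDedup, if_pos hc, step, hca, List.find?_cons_of_neg (by simp [hk])]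
      · have hc' : PySem.Set.contains s wp.1 = false := by
          revert hc; cases PySem.Set.contains s wp.1 <;> simp
        rw [pvDedup, if_neg (by rw [hc']; simp)]
        rw [List.find?_cons_of_neg (by simp [hk]), List.find?_cons_of_neg (by simp [hk])]
        rw [step, hca]

lemma pvDedup_nodup : ∀ (E : List ((Int × Int × Int × Int) × Int))
    (s : PySem.Set (Int × Int × Int × Int)),
    ((pvDedup s E).map Prod.fst).Nodup ∧
      ∀ p ∈ pvDedup s E, PySem.Set.contains s p.1 = false := by
  intro E
  induction E with
  | nil => intro s; simp [pvDedup]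
  | cons wp t ih =>
    intro s
    obtain ⟨ihn, ihm⟩ := ih (PySem.Set.add s wp.1)
    by_cases hc : PySem.Set.contains s wp.1 = true
    · rw [pvDedup, if_pos hc]
      refine ⟨ihn, fun p hp => ?_⟩
      have := ihm p hp
      rw [pvContains_add] at this
      revert this
      cases PySem.Set.contains s p.1 <;> simp
    · have hc' : PySem.Set.contains s wp.1 = false := by
        revert hc; cases PySem.Set.contains s wp.1 <;> simp
      rw [pvDedup, if_neg (by rw [hc']; simp)]
      constructor
      · rw [List.map_cons, List.nodup_cons]
        refine ⟨fun hmem => ?_, ihn⟩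
        obtain ⟨p, hp, hfst⟩ := List.mem_map.mp hmem
        have := ihm p hp
        rw [pvContains_add, hfst] at this
        simp at this
      · intro p hp
        rcases List.mem_cons.mp hp with h | h
        · rw [h]; exact hc'
        · have := ihm p h
          rw [pvContains_add] at this
          revert this
          cases PySem.Set.contains s p.1 <;> simp

-- find? at a key is invariant under permutation when keys are unique
lemma pvFindPerm {κ ν : Type} [BEq κ] [LawfulBEq κ] (l l' : List (κ × ν))
    (h : l.Perm l') (hnd : (l.map Prod.fst).Nodup) (k : κ) :
    l.find? (fun q => q.1 == k) = l'.find? (fun q => q.1 == k) := by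
  have hnd' : (l'.map Prod.fst).Nodup := (h.map Prod.fst).nodup_iff.mp hnd
  cases hf : l.find? (fun q => q.1 == k) with
  | some p =>
    have hp : p ∈ l := List.mem_of_find?_eq_some hf
    have hpk : p.1 = k := by simpa using List.find?_some hf
    have : l'.find? (fun q => q.1 == p.1) = some p := (pvFindMem l' hnd' p).mp (h.mem_iff.mp hp)
    rw [hpk] at this
    rw [this]
  | none =>
    have hnone := List.find?_eq_none.mp hf
    symm
    rw [List.find?_eq_none]
    exact fun x hx => hnone x (h.mem_iff.mpr hx)

-- the items of an 'add' fold: old entries updated in place, new keys appended in order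
lemma pvFoldAddItems {κ : Type} [BEq κ] [LawfulBEq κ] :
    ∀ (L : List (κ × Int)) (d : PySem.Dict κ Int), (L.map Prod.fst).Nodup → d.keys.Nodup →
    (L.foldl pvAdd d).items =
      d.items.map (fun e =>
        match L.find? (fun q => q.1 == e.1) with
        | some p => (e.1, e.2 + p.2)
        | none => e) ++
      L.filter (fun p => !(d.contains p.1)) := by
  intro L
  induction L with
  | nil =>
    intro d _ _
    simp [List.find?_nil]
  | cons p L ih =>
    intro d hL hd
    have hpL : p.1 ∉ L.map Prod.fst := (List.nodup_cons.mp hL).1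
    have hL' : (L.map Prod.fst).Nodup := (List.nodup_cons.mp hL).2
    have hfindL : L.find? (fun q => q.1 == p.1) = none := by
      rw [List.find?_eq_none]
      intro x hx
      simp only [beq_iff_eq]
      exact fun h => hpL (List.mem_map.mpr ⟨x, hx, h⟩)
    have hd' : (pvAdd d p).keys.Nodup := by
      simpa [pvAdd] using PySem.Dict.nodup_keys_insert d p.1 _ hd
    rw [List.foldl_cons, ih (pvAdd d p) hL' hd']
    have hfiltAux : L.filter (fun x => !((pvAdd d p).contains x.1)) =
        L.filter (fun x => !(d.contains x.1)) := by
      apply List.filter_congr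
      intro x hx
      have hxp : (x.1 == p.1) = false := by
        rw [beq_eq_false_iff_ne]
        exact fun h => hpL (h ▸ List.mem_map.mpr ⟨x, hx, rfl⟩)
      simp [pvAdd, PySem.Dict.contains_insert, hxp]
    by_cases hc : d.contains p.1 = true
    · have hitems : (pvAdd d p).items =
          d.items.map (fun e => if (e.1 == p.1) = true then (p.1, d.getD p.1 0 + p.2) else e) := by
        show (d.insert p.1 (d.getD p.1 0 + p.2)).items = _
        rw [PySem.Dict.items_insert, if_pos hc]
      rw [hitems, List.map_map]
      have hmap : ∀ e ∈ d.items,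
          ((fun e => match L.find? (fun q => q.1 == e.1) with
            | some q => (e.1, e.2 + q.2)
            | none => e) ∘
           (fun e => if (e.1 == p.1) = true then (p.1, d.getD p.1 0 + p.2) else e)) e =
          (fun e => match (p :: L).find? (fun q => q.1 == e.1) with
            | some q => (e.1, e.2 + q.2)
            | none => e) e := by
        intro e he
        by_cases hep : e.1 = p.1
        · have hgd : d.getD p.1 0 = e.2 := by
            rw [← hep]
            exact PySem.Dict.getD_of_mem_items (d := d) (k := e.1) (v := e.2)
              (by simpa using he) hd 0
          have hif : (e.1 == p.1) = true := by simp [hep]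
          have hinner : (if (e.1 == p.1) = true then (p.1, d.getD p.1 0 + p.2) else e) =
              (p.1, e.2 + p.2) := by rw [if_pos hif, hgd]
          simp only [Function.comp_apply]
          rw [hinner, hep, List.find?_cons_of_pos (by simp)]
          simp [hfindL]
        · have hif : (e.1 == p.1) = false := by simp [hep]
          have hinner : (if (e.1 == p.1) = true then (p.1, d.getD p.1 0 + p.2) else e) = e := by
            rw [if_neg (by simp [hif])]
          simp only [Function.comp_apply, hinner]
          rw [List.find?_cons_of_neg (by simp only [beq_iff_eq]; exact fun h => hep h.symm)]
      rw [List.map_congr_left hmap, hfiltAux, List.filter_cons, if_neg (by simp [hc])]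
    · have hc' : d.contains p.1 = false := by
        revert hc; cases d.contains p.1 <;> simp
      have hitems : (pvAdd d p).items = d.items ++ [(p.1, p.2)] := by
        show (d.insert p.1 (d.getD p.1 0 + p.2)).items = _
        rw [PySem.Dict.items_insert, if_neg (by simp [hc']),
          PySem.Dict.getD_of_not_contains _ _ hc', zero_add]
      rw [hitems, List.map_append]
      have hmap : ∀ e ∈ d.items,
          (fun e => match L.find? (fun q => q.1 == e.1) with
            | some q => (e.1, e.2 + q.2)
            | none => e) e =
          (fun e => match (p :: L).find? (fun q => q.1 == e.1) with
            | some q => (e.1, e.2 + q.2)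
            | none => e) e := by
        intro e he
        have hep : p.1 ≠ e.1 := by
          intro h
          have hct : d.contains p.1 = true :=
            (PySem.Dict.contains_iff_mem_keys _ _).mpr (h ▸ PySem.Dict.mem_keys_of_mem_items _ he)
          rw [hc'] at hct
          cases hct
        beta_reduce
        rw [List.find?_cons_of_neg (by simp only [beq_iff_eq]; exact hep)]
      rw [List.map_congr_left hmap]
      have hsing : ([(p.1, p.2)] : List (κ × Int)).map (fun e =>
          match L.find? (fun q => q.1 == e.1) with
          | some q => (e.1, e.2 + q.2)
          | none => e) = [(p.1, p.2)] := by
        simp only [List.map_cons, List.map_nil, hfindL]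
      rw [hsing, hfiltAux, List.filter_cons, if_pos (by simp [hc']), List.append_assoc]
      rfl

-- identity-key max only depends on the multiset of values
lemma pvMaxPerm (l l' : List Int) (h : l.Perm l') :
    PySem.List.max? l (fun v => v) = PySem.List.max? l' (fun v => v) := by
  cases hl : PySem.List.max? l (fun v => v) with
  | none =>
    have hnil : l = [] := by simpa [PySem.List.max?_eq_none_iff] using hl
    subst hnil
    have hnil' : l' = [] := h.symm.eq_nil
    subst hnil'
    rfl
  | some m =>
    cases hl' : PySem.List.max? l' (fun v => v) with
    | none =>
      have hnil' : l' = [] := by simpa [PySem.List.max?_eq_none_iff] using hl'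
      subst hnil'
      have hnil : l = [] := h.eq_nil
      subst hnil
      simp [PySem.List.max?] at hl
    | some m' =>
      have hm : m ∈ l := PySem.List.max?_mem hl
      have hm' : m' ∈ l' := PySem.List.max?_mem hl'
      have h1 : m ≤ m' := PySem.List.max?_isMax hl' m (h.mem_iff.mp hm)
      have h2 : m' ≤ m := PySem.List.max?_isMax hl m' (h.mem_iff.mpr hm')
      rw [le_antisymm h1 h2]

-- find? over flattened keys is the flattened find?
lemma pvFindMapToL (L : List ((Int × Int × Int × Int) × Int)) (k : Int × Int × Int × Int) :
    (L.map pvToLize).find? (fun q => q.1 == pvToL k) =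
      (L.find? (fun q => q.1 == k)).map pvToLize := by
  rw [List.find?_map]
  have hpred : ((fun q : List Int × Int => q.1 == pvToL k) ∘ pvToLize) =
      (fun q : (Int × Int × Int × Int) × Int => q.1 == k) := by
    funext q
    simp only [Function.comp_apply, pvToLize, pvBeq]
  rw [hpred]

-- keys of an 'add' fold stay unique
lemma pvAddFoldNodup {κ : Type} [BEq κ] [LawfulBEq κ] (L : List (κ × Int))
    (d : PySem.Dict κ Int) (h : d.keys.Nodup) : (L.foldl pvAdd d).keys.Nodup :=
  PySem.Dict.nodup_keys_foldl_insert_key L Prod.fst (fun d p => d.getD p.1 0 + p.2) d h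

-- the related dicts agree on containment of flattened keys
lemma pvContRel (dA : PySem.Dict (List Int) Int) (dB : PySem.Dict (Int × Int × Int × Int) Int)
    (hd : dA.items.Perm (dB.items.map pvToLize)) (k : Int × Int × Int × Int) :
    dA.contains (pvToL k) = dB.contains k := by
  rw [Bool.eq_iff_iff, PySem.Dict.contains_iff_mem_keys, PySem.Dict.contains_iff_mem_keys]
  have hk : dA.keys.Perm (dB.keys.map pvToL) := by
    have := hd.map Prod.fst
    simpa [PySem.Dict.keys, List.map_map, Function.comp, pvToLize] using this
  rw [hk.mem_iff]
  constructor
  · intro hm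
    obtain ⟨q, hq, he⟩ := List.mem_map.mp hm
    exact (pvToL_inj.mp he.symm) ▸ hq
  · exact fun hm => List.mem_map.mpr ⟨k, hm, rfl⟩

-- folding 'add' over permuted unique-key event lists preserves the item relation
lemma pvFoldRel (LB : List ((Int × Int × Int × Int) × Int)) (LA : List (List Int × Int))
    (hperm : LA.Perm (LB.map pvToLize)) (hndB : (LB.map Prod.fst).Nodup)
    (dA : PySem.Dict (List Int) Int) (dB : PySem.Dict (Int × Int × Int × Int) Int)
    (hd : dA.items.Perm (dB.items.map pvToLize)) (hndA : dA.keys.Nodup)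
    (hndBd : dB.keys.Nodup) :
    (LA.foldl pvAdd dA).items.Perm ((LB.foldl pvAdd dB).items.map pvToLize) := by
  have hndLA : (LA.map Prod.fst).Nodup := by
    refine (hperm.map Prod.fst).nodup_iff.mpr ?_
    have : (LB.map pvToLize).map Prod.fst = (LB.map Prod.fst).map pvToL := by
      simp [List.map_map, Function.comp, pvToLize]
    rw [this]
    exact hndB.map (fun a b => pvToL_inj.mp)
  rw [pvFoldAddItems LA dA hndLA hndA, pvFoldAddItems LB dB hndB hndBd, List.map_append]
  refine List.Perm.append ?_ ?_
  · refine ((hd.map _).trans (List.Perm.of_eq ?_))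
    rw [List.map_map, List.map_map]
    apply List.map_congr_left
    intro e _
    simp only [Function.comp_apply]
    rw [show (pvToLize e).1 = pvToL e.1 from rfl, pvFindPerm LA (LB.map pvToLize) hperm hndLA,
      pvFindMapToL]
    cases hf : LB.find? (fun q => q.1 == e.1) with
    | some q => rfl
    | none => rfl
  · refine ((hperm.filter _).trans (List.Perm.of_eq ?_))
    rw [List.filter_map]
    congr 1
    apply List.filter_congr
    intro x _
    simp only [Function.comp_apply]
    rw [show (pvToLize x).1 = pvToL x.1 from rfl, pvContRel dA dB hd]

-- A's whole buyer loop is the 'add' fold over the deduped, flattened event stream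
lemma pvBuyerA_eq (secrets : List Int) (dA : PySem.Dict (List Int) Int) :
    pvBuyerA dA secrets =
      ((pvDedup PySem.Set.empty
          (pvEvents (secrets.map (fun s => PySem.Int.mod s 10)))).map pvToLize).foldl
        pvAdd dA := by
  rw [List.foldl_map]
  have hstep : (fun (d : PySem.Dict (List Int) Int) x => pvAdd d (pvToLize x)) = pvAddL := rfl
  rw [hstep]
  have hfold : ∀ (init : PySem.Set (List Int) × List Int × PySem.Dict (List Int) Int),
      (secrets.zip secrets.tail).foldl pvStepA init =
      ((secrets.zip secrets.tail).map pvCP).foldl pvStepA' init := by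
    intro init; rw [List.foldl_map]; rfl
  have hcps : (secrets.zip secrets.tail).map pvCP =
      ((secrets.map (fun s => PySem.Int.mod s 10)).zip
        (secrets.map (fun s => PySem.Int.mod s 10)).tail).map (fun ab => (ab.2 - ab.1, ab.2)) := by
    rw [← List.map_tail, List.zip_map, List.map_map]
    rfl
  show ((secrets.zip secrets.tail).foldl pvStepA (PySem.Set.empty, ([] : List Int), dA)).2.2 = _
  rw [hfold, hcps]
  match secrets with
  | [] => rfl
  | [s0] => rfl
  | [s0, s1] =>
    exact pvShortA _ _ _ _ (by simp)
  | [s0, s1, s2] =>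
    exact pvShortA _ _ _ _ (by simp)
  | s0 :: s1 :: s2 :: s3 :: r =>
    simp only [List.map_cons, List.tail_cons, List.zip_cons_cons, List.foldl_cons]
    rw [pvRamp]
    refine (pvSteady _ _ _ _ _ (pvSlice3 _ (by simp)) _ PySem.Set.empty ?_ dA).trans ?_
    all_goals first
    | (intro q
       rw [pvContains_false _ _ (by simp [pvToL])]
       try rfl)
    | (rw [pvWinEvents]
       try rfl)

-- B's first_price loop is an insert fold over the reversed event stream
lemma pvFPfold (ps : List Int) :
    ((PySem.List.pyRange 4 (PySem.List.len ps) 1).reverse).foldl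
      (fun fp i =>
        fp.insert (PySem.List.pyGetD ps (i - 3) 0 - PySem.List.pyGetD ps (i - 4) 0,
          PySem.List.pyGetD ps (i - 2) 0 - PySem.List.pyGetD ps (i - 3) 0,
          PySem.List.pyGetD ps (i - 1) 0 - PySem.List.pyGetD ps (i - 2) 0,
          PySem.List.pyGetD ps i 0 - PySem.List.pyGetD ps (i - 1) 0)
          (PySem.List.pyGetD ps i 0))
      PySem.Dict.empty =
    (pvEvents ps).reverse.foldl (fun fp q => fp.insert q.1 q.2) PySem.Dict.empty := by
  rw [← pvEmap ps, ← List.map_reverse, List.foldl_map]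

-- the first_price dict holds exactly the deduped event stream, as a set of pairs
lemma pvFPitems (E : List ((Int × Int × Int × Int) × Int)) :
    (E.reverse.foldl (fun fp q => fp.insert q.1 q.2)
      (PySem.Dict.empty : PySem.Dict (Int × Int × Int × Int) Int)).items.Perm
      (pvDedup PySem.Set.empty E) ∧
    (E.reverse.foldl (fun fp q => fp.insert q.1 q.2)
      (PySem.Dict.empty : PySem.Dict (Int × Int × Int × Int) Int)).keys.Nodup := by
  set fp := E.reverse.foldl (fun fp q => fp.insert q.1 q.2)
    (PySem.Dict.empty : PySem.Dict (Int × Int × Int × Int) Int) with hfp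
  have hnd : fp.keys.Nodup := by
    exact PySem.Dict.nodup_keys_foldl_insert_key E.reverse Prod.fst (fun d q => q.2) _
      PySem.Dict.nodup_keys_empty
  refine ⟨?_, hnd⟩
  have hget : ∀ k, fp.get? k = match E.find? (fun p => p.1 == k) with
      | some p => some p.2
      | none => none := by
    intro k
    rw [hfp, pvGetFoldIns, List.reverse_reverse]
    cases E.find? (fun p => p.1 == k) with
    | some p => rfl
    | none => rfl
  have hdnd := pvDedup_nodup E PySem.Set.empty
  apply (List.perm_ext_iff_of_nodup ?_ ?_).mpr
  · intro p
    rw [pvFindMem (pvDedup PySem.Set.empty E) hdnd.1 p, pvDedup_find?]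
    rw [if_neg (by simp [PySem.Set.empty, PySem.Set.contains])]
    have hm : p ∈ fp.items ↔ fp.get? p.1 = some p.2 := by
      have he : p = (p.1, p.2) := rfl
      rw [he, ← PySem.Dict.get?_eq_some_iff_mem_items fp p.1 p.2 hnd]
    rw [hm, hget p.1]
    cases hf : E.find? (fun q => q.1 == p.1) with
    | some q =>
      have hq1 : q.1 = p.1 := by simpa using List.find?_some hf
      constructor
      · intro hs
        rw [Option.some_inj] at hs
        have : p = (p.1, p.2) := rfl
        rw [this, ← hq1, ← hs]
      · intro hs
        rw [Option.some_inj] at hs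
        rw [← hs]
    | none => simp
  · exact hnd.of_map
  · exact hdnd.1.of_map

-- the outer buyer loop preserves the item relation
lemma pvRel : ∀ (bs : List (List Int)) (dA : PySem.Dict (List Int) Int)
    (dB : PySem.Dict (Int × Int × Int × Int) Int),
    dA.items.Perm (dB.items.map pvToLize) → dA.keys.Nodup → dB.keys.Nodup →
    (bs.foldl pvBuyerA dA).items.Perm ((bs.foldl pvBuyerB dB).items.map pvToLize) := by
  intro bs
  induction bs with
  | nil => intro dA dB hd _ _; exact hd
  | cons s bs ih =>
    intro dA dB hd hndA hndB
    simp only [List.foldl_cons]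
    set ps := s.map (fun x => PySem.Int.mod x 10) with hps
    set E := pvEvents ps with hE
    have hB : pvBuyerB dB s =
        (E.reverse.foldl (fun fp q => fp.insert q.1 q.2)
          (PySem.Dict.empty : PySem.Dict (Int × Int × Int × Int) Int)).items.foldl pvAdd dB := by
      show (((PySem.List.pyRange 4 (PySem.List.len ps) 1).reverse).foldl _
        PySem.Dict.empty).items.foldl _ dB = _
      rw [pvFPfold ps]
      rfl
    obtain ⟨hfperm, hfnd⟩ := pvFPitems E
    have hfkeys : ((E.reverse.foldl (fun fp q => fp.insert q.1 q.2)
        (PySem.Dict.empty : PySem.Dict (Int × Int × Int × Int) Int)).items.map Prod.fst).Nodup :=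
      hfnd
    have hstep := pvFoldRel
      ((E.reverse.foldl (fun fp q => fp.insert q.1 q.2)
        (PySem.Dict.empty : PySem.Dict (Int × Int × Int × Int) Int)).items)
      ((pvDedup PySem.Set.empty E).map pvToLize)
      (hfperm.symm.map pvToLize) hfkeys dA dB hd hndA hndB
    rw [← pvBuyerA_eq s dA, ← hB] at hstep
    refine ih _ _ hstep ?_ ?_
    · rw [pvBuyerA_eq s dA]
      exact pvAddFoldNodup _ _ hndA
    · rw [hB]
      exact pvAddFoldNodup _ _ hndB

-- ===== VERDICT (by name: the statement is the Claim_ definition above) =====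
theorem get_best_price_spec : Claim_equal_get_best_price := by
  intro bs _ _
  unfold Spec_get_best_price
  simp only [get_best_price, get_best_price_alt]
  have hrel := pvRel bs PySem.Dict.empty PySem.Dict.empty (by rfl)
    PySem.Dict.nodup_keys_empty PySem.Dict.nodup_keys_empty
  have hvals : (bs.foldl pvBuyerA PySem.Dict.empty).values.Perm
      ((bs.foldl pvBuyerB PySem.Dict.empty).values) := by
    have := hrel.map Prod.snd
    simpa [PySem.Dict.values, List.map_map, Function.comp, pvToLize] using this
  rw [pvMaxPerm _ _ hvals]
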